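-- pv_equiv track=rewrite | github.com/cellsites/cellsites.github.io | convertdata.py | getLatZone
-- ===== SOURCE A (Python) =====
-- def getLatZone(latitude):
--   posLetters = 'NPQRSTUVWXZ'
--   negLetters = 'ACDEFGJKLM'
--   posDegrees = [ 0, 8, 16, 24, 32, 40, 48, 56, 64, 72, 84 ]
--   negDegrees = [ -90, -84, -72, -64, -56, -48, -40, -32, -24, -16, -8 ]
--
--   latIndex = -2
--   lat = int(latitude)
--   latZone = ''
--
--   if (lat >= 0):
--     i = 0
--     letterslen = len(posLetters)
--     while i < letterslen:
--       if (lat == posDegrees[i]):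
--         latIndex = i
--         break
--       if (lat > posDegrees[i]):
--         i += 1
--         continue
--       else:
--         latIndex = i - 1
--         break
--   else:
--     i = 0
--     letterslen = len(negLetters)
--     while (i < letterslen):
--       if (lat == negDegrees[i]):
--         latIndex = i
--         break
--       if (lat < negDegrees[i]):
--         latIndex = i - 1
--         break
--       else:
--         i += 1
--         continue
--
--   if (latIndex == -1):
--     latIndex = 0
--   if (lat >= 0):
--     if (latIndex == -2):
--       latIndex = len(posLetters) - 1
--     latZone = posLetters[latIndex]
--   else:
--     if (latIndex == -2):
--       latIndex = len(negLetters) - 1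
--     latZone = negLetters[latIndex]
--   return latZone
-- ===== SOURCE B (Python) =====
-- def getLatZone(latitude):
--   lat = int(latitude)
--   if lat >= 0:
--     idx = 10 if lat >= 84 else min(lat // 8, 9)
--     return 'NPQRSTUVWXZ'[idx]
--   if lat >= -72:
--     return 'ACDEFGJKLM'[min((lat + 72) // 8 + 2, 9)]
--   return 'A' if lat < -84 else 'C'
-- ===== Notes on version B (the rewrite author's own statement) =====
-- stated objective: simpler
-- what changed: Replaces the two sentinel-driven while loops over the threshold tables by a closed-form arithmetic band index (floor division by 8 with clamping), eliminating the scans and the sentinel patch-up logic entirely.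
import Mathlib
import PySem

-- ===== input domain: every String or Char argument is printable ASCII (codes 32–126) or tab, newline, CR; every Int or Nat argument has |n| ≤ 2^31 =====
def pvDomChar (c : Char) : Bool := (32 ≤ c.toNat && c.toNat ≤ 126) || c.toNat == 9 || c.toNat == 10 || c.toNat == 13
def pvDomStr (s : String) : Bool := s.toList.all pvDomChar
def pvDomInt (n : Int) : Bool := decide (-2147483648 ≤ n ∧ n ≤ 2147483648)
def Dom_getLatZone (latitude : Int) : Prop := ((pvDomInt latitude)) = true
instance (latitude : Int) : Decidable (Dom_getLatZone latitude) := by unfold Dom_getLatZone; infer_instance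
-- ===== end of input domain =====

-- B replaces A's two sentinel-driven while loops by a closed-form arithmetic band index (simpler, no loops).

-- ===== PORT A =====
-- Python s[i] on a 1-char-returning in-range index: Option Char → 1-char String (index always in range here).
def pvCharStr : Option Char → String
  | some c => String.ofList [c]
  | none => ""

def pvPosDegrees : List Int := [0, 8, 16, 24, 32, 40, 48, 56, 64, 72, 84]
def pvNegDegrees : List Int := [-90, -84, -72, -64, -56, -48, -40, -32, -24, -16, -8]

-- the positive while loop: i runs over 0..len(posLetters)-1 indexing posDegrees (same 11 entries)
def pvPosScan (lat : Int) : List (Int × Int) → Int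
  | [] => -2                                  -- loop fell through: latIndex keeps its sentinel -2
  | (i, d) :: rest =>
    if lat = d then i
    else if lat > d then pvPosScan lat rest
    else i - 1

-- the negative while loop: i runs over 0..len(negLetters)-1 = 0..9, so only the FIRST TEN negDegrees are inspected
def pvNegScan (lat : Int) : List (Int × Int) → Int
  | [] => -2
  | (i, d) :: rest =>
    if lat = d then i
    else if lat < d then i - 1
    else pvNegScan lat rest

def getLatZone (latitude : Int) : String :=
  let posLetters := "NPQRSTUVWXZ"
  let negLetters := "ACDEFGJKLM"
  let lat := latitude                          -- int(latitude) is the identity on Int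
  let latIndex : Int :=
    if lat ≥ 0 then pvPosScan lat (PySem.List.enumerate pvPosDegrees 0)
    else pvNegScan lat (PySem.List.enumerate (pvNegDegrees.take 10) 0)
  let latIndex := if latIndex = -1 then 0 else latIndex
  if lat ≥ 0 then
    let latIndex := if latIndex = -2 then PySem.Str.len posLetters - 1 else latIndex
    pvCharStr (PySem.Str.pyGet? posLetters latIndex)
  else
    let latIndex := if latIndex = -2 then PySem.Str.len negLetters - 1 else latIndex
    pvCharStr (PySem.Str.pyGet? negLetters latIndex)

-- ===== PORT B =====
def getLatZone_alt (latitude : Int) : String :=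
  let lat := latitude
  if lat ≥ 0 then
    let idx : Int := if lat ≥ 84 then 10 else min (PySem.Int.floordiv lat 8) 9
    pvCharStr (PySem.Str.pyGet? "NPQRSTUVWXZ" idx)
  else if lat ≥ -72 then
    pvCharStr (PySem.Str.pyGet? "ACDEFGJKLM" (min (PySem.Int.floordiv (lat + 72) 8 + 2) 9))
  else if lat < -84 then "A" else "C"

-- ===== PRECONDITION & SPEC =====
def Spec_getLatZone (latitude : Int) (out : String) : Prop := out = getLatZone_alt latitude
instance (latitude : Int) (out : String) : Decidable (Spec_getLatZone latitude out) := by unfold Spec_getLatZone; infer_instance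

-- ===== CLAIM (what is proved, stated in full; the proofs are below) =====
def Claim_equal_getLatZone : Prop := ∀ (latitude : Int), Dom_getLatZone latitude → Spec_getLatZone latitude (getLatZone latitude)

-- ===== LEMMAS AND PROOFS =====

theorem pvEnumPos : PySem.List.enumerate pvPosDegrees 0 =
    [((0:Int),(0:Int)),(1,8),(2,16),(3,24),(4,32),(5,40),(6,48),(7,56),(8,64),(9,72),(10,84)] := by decide

theorem pvEnumNeg : PySem.List.enumerate (pvNegDegrees.take 10) 0 =
    [((0:Int),(-90:Int)),(1,-84),(2,-72),(3,-64),(4,-56),(5,-48),(6,-40),(7,-32),(8,-24),(9,-16)] := by decide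

theorem pvPosScan_step (lat i d : Int) (rest : List (Int × Int)) (h : d < lat) :
    pvPosScan lat ((i, d) :: rest) = pvPosScan lat rest := by
  simp only [pvPosScan]
  rw [if_neg (by omega), if_pos (by omega)]

theorem pvA_hi (lat : Int) (h : 85 ≤ lat) : getLatZone lat = "Z" := by
  unfold getLatZone
  rw [pvEnumPos]
  simp only [ge_iff_le, if_pos (show (0:Int) ≤ lat by omega)]
  repeat rw [pvPosScan_step _ _ _ _ (by omega)]
  simp only [pvPosScan]
  decide

theorem pvB_hi (lat : Int) (h : 85 ≤ lat) : getLatZone_alt lat = "Z" := by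
  unfold getLatZone_alt
  simp only [ge_iff_le, if_pos (show (0:Int) ≤ lat by omega), if_pos (show (84:Int) ≤ lat by omega)]
  decide

theorem pvA_lo (lat : Int) (h : lat ≤ -91) : getLatZone lat = "A" := by
  unfold getLatZone
  rw [pvEnumNeg]
  simp only [ge_iff_le, if_neg (show ¬ (0:Int) ≤ lat by omega)]
  simp only [pvNegScan]
  rw [if_neg (by omega), if_pos (by omega)]
  decide

theorem pvB_lo (lat : Int) (h : lat ≤ -91) : getLatZone_alt lat = "A" := by
  unfold getLatZone_alt
  simp only [ge_iff_le, if_neg (show ¬ (0:Int) ≤ lat by omega),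
    if_neg (show ¬ (-72:Int) ≤ lat by omega), if_pos (show lat < (-84:Int) by omega)]

set_option maxRecDepth 20000 in
theorem pv_mid : ∀ n : Fin 175, getLatZone ((n : Int) - 90) = getLatZone_alt ((n : Int) - 90) := by
  decide

theorem pv_eq_all (lat : Int) : getLatZone lat = getLatZone_alt lat := by
  by_cases hhi : 85 ≤ lat
  · rw [pvA_hi lat hhi, pvB_hi lat hhi]
  · by_cases hlo : lat ≤ -91
    · rw [pvA_lo lat hlo, pvB_lo lat hlo]
    · have hn : ∃ n : Fin 175, lat = (n : Int) - 90 :=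
        ⟨⟨(lat + 90).toNat, by omega⟩, by simp; omega⟩
      obtain ⟨n, rfl⟩ := hn
      exact pv_mid n

-- ===== VERDICT (by name: the statement is the Claim_ definition above) =====
theorem getLatZone_spec : Claim_equal_getLatZone := by
  intro lat _
  unfold Spec_getLatZone
  exact pv_eq_all lat
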